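-- pv_equiv track=rewrite | github.com/liortesta/roblox-voice-creator-2026 | src/template_builder.py | build_obby
-- ===== SOURCE A (Python) =====
-- def build_obby(num_platforms: int = 10, difficulty: str = "easy") -> str:
--     """
--     Build an obstacle course.
--
--     Args:
--         num_platforms: Number of platforms
--         difficulty: "easy", "medium", or "hard" (affects spacing)
--
--     Returns:
--         Lua code for the obby
--     """
--     lines = []
--     lines.append("local parts = {}")
--     lines.append("")
--     lines.append('local obbyModel = Instance.new("Model")')
--     lines.append('obbyModel.Name = "Obby"')
--     lines.append("obbyModel.Parent = workspace")
--     lines.append("")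
--
--     # Difficulty settings
--     spacing = {"easy": 8, "medium": 12, "hard": 16}.get(difficulty, 10)
--     height_var = {"easy": 2, "medium": 4, "hard": 6}.get(difficulty, 3)
--
--     # Start platform
--     lines.append("-- Start Platform")
--     lines.append('local startPlatform = Instance.new("SpawnLocation")')
--     lines.append('startPlatform.Name = "Start"')
--     lines.append("startPlatform.Size = Vector3.new(15, 3, 15)")
--     lines.append("startPlatform.Position = Vector3.new(0, 1.5, 0)")
--     lines.append('startPlatform.BrickColor = BrickColor.new("Bright green")')
--     lines.append("startPlatform.Material = Enum.Material.Grass")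
--     lines.append("startPlatform.Anchored = true")
--     lines.append("startPlatform.Parent = obbyModel")
--     lines.append("table.insert(parts, startPlatform)")
--     lines.append("")
--
--     current_x = 0
--     current_y = 3
--     current_z = 15
--
--     colors = ["Bright red", "Bright blue", "Bright yellow", "Bright green", "Bright orange"]
--
--     for i in range(num_platforms):
--         current_z += spacing
--         current_y += (i % 3 - 1) * height_var  # Vary height
--         if current_y < 3:
--             current_y = 3
--
--         color = colors[i % len(colors)]
--
--         lines.append(f"-- Platform {i + 1}")
--         lines.append(f'local platform{i + 1} = Instance.new("Part")')
--         lines.append(f'platform{i + 1}.Name = "Platform{i + 1}"')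
--         lines.append(f"platform{i + 1}.Size = Vector3.new(6, 1, 6)")
--         lines.append(f"platform{i + 1}.Position = Vector3.new({current_x}, {current_y}, {current_z})")
--         lines.append(f'platform{i + 1}.BrickColor = BrickColor.new("{color}")')
--         lines.append(f"platform{i + 1}.Material = Enum.Material.Neon")
--         lines.append(f"platform{i + 1}.Anchored = true")
--         lines.append(f"platform{i + 1}.Parent = obbyModel")
--         lines.append(f"table.insert(parts, platform{i + 1})")
--         lines.append("")
--
--     # End platform
--     lines.append("-- End Platform (Victory)")
--     lines.append('local endPlatform = Instance.new("Part")')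
--     lines.append('endPlatform.Name = "Victory"')
--     lines.append("endPlatform.Size = Vector3.new(15, 3, 15)")
--     lines.append(f"endPlatform.Position = Vector3.new(0, {current_y + 5}, {current_z + spacing})")
--     lines.append('endPlatform.BrickColor = BrickColor.new("Gold")')
--     lines.append("endPlatform.Material = Enum.Material.Neon")
--     lines.append("endPlatform.Anchored = true")
--     lines.append("endPlatform.Parent = obbyModel")
--     lines.append("table.insert(parts, endPlatform)")
--     lines.append("")
--
--     lines.append("game.Selection:Set(parts)")
--
--     return "\n".join(lines)
-- ===== SOURCE B (Python) =====
-- # B: closed-form rendering — no running y/z state: platform i's height and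
-- # depth are computed directly (y = 3+height_var iff i%3==2, since the clamp
-- # pins the -height_var and +0 steps back to 3 for the non-negative
-- # height_var values; z = 15+spacing*(i+1)), and the lines are emitted from
-- # these formulas.
--
-- _HEADER_LINES = [
--     "local parts = {}",
--     "",
--     'local obbyModel = Instance.new("Model")',
--     'obbyModel.Name = "Obby"',
--     "obbyModel.Parent = workspace",
--     "",
--     "-- Start Platform",
--     'local startPlatform = Instance.new("SpawnLocation")',
--     'startPlatform.Name = "Start"',
--     "startPlatform.Size = Vector3.new(15, 3, 15)",
--     "startPlatform.Position = Vector3.new(0, 1.5, 0)",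
--     'startPlatform.BrickColor = BrickColor.new("Bright green")',
--     "startPlatform.Material = Enum.Material.Grass",
--     "startPlatform.Anchored = true",
--     "startPlatform.Parent = obbyModel",
--     "table.insert(parts, startPlatform)",
--     "",
-- ]
--
-- _COLORS = ["Bright red", "Bright blue", "Bright yellow", "Bright green", "Bright orange"]
--
--
-- def _platform_lines(i, y, z, color):
--     n = i + 1
--     return [
--         f"-- Platform {n}",
--         f'local platform{n} = Instance.new("Part")',
--         f'platform{n}.Name = "Platform{n}"',
--         f"platform{n}.Size = Vector3.new(6, 1, 6)",
--         f"platform{n}.Position = Vector3.new(0, {y}, {z})",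
--         f'platform{n}.BrickColor = BrickColor.new("{color}")',
--         f"platform{n}.Material = Enum.Material.Neon",
--         f"platform{n}.Anchored = true",
--         f"platform{n}.Parent = obbyModel",
--         f"table.insert(parts, platform{n})",
--         "",
--     ]
--
--
-- def _footer_lines(end_y, end_z):
--     return [
--         "-- End Platform (Victory)",
--         'local endPlatform = Instance.new("Part")',
--         'endPlatform.Name = "Victory"',
--         "endPlatform.Size = Vector3.new(15, 3, 15)",
--         f"endPlatform.Position = Vector3.new(0, {end_y}, {end_z})",
--         'endPlatform.BrickColor = BrickColor.new("Gold")',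
--         "endPlatform.Material = Enum.Material.Neon",
--         "endPlatform.Anchored = true",
--         "endPlatform.Parent = obbyModel",
--         "table.insert(parts, endPlatform)",
--         "",
--         "game.Selection:Set(parts)",
--     ]
--
--
-- def build_obby(num_platforms: int = 10, difficulty: str = "easy") -> str:
--     spacing = {"easy": 8, "medium": 12, "hard": 16}.get(difficulty, 10)
--     height_var = {"easy": 2, "medium": 4, "hard": 6}.get(difficulty, 3)
--
--     def _y(i):
--         return 3 + height_var if i % 3 == 2 else 3
--
--     def _z(i):
--         return 15 + spacing * (i + 1)
--
--     def _lines():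
--         yield from _HEADER_LINES
--         for i in range(num_platforms):
--             yield from _platform_lines(i, _y(i), _z(i), _COLORS[i % 5])
--         end_y = (_y(num_platforms - 1) if num_platforms > 0 else 3) + 5
--         end_z = (_z(num_platforms - 1) if num_platforms > 0 else 15) + spacing
--         yield from _footer_lines(end_y, end_z)
--
--     return "\n".join(_lines())
-- ===== Notes on version B (the rewrite author's own statement) =====
-- stated objective: alternative
-- what changed: A threads running current_y/current_z state through a compute-and-emit loop; B replaces the state entirely with closed forms (y = 3+height_var iff i%3==2, since the clamp pins the other steps to 3 for the non-negative height_var values; z = 15+spacing*(i+1)) and renders each platform block and the end platform directly from those formulas.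
import Mathlib
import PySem

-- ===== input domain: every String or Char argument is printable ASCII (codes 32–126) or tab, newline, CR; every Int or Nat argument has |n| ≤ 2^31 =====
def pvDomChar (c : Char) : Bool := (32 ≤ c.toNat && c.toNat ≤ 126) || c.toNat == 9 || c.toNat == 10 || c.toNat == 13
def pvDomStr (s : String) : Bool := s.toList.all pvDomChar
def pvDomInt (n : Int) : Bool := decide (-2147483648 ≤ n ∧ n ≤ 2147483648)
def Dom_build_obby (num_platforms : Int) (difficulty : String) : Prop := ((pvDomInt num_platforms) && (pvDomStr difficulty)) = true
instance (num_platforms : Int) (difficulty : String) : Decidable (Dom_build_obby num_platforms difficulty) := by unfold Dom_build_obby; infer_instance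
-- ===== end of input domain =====

-- B changes the decomposition only (compute positions table, then render); equal output by the proof below.

-- ===== PORT A =====
-- A's loop: state is (lines so far, current_y, current_z); current_x stays 0 throughout.
def pvStepA (spacing height_var : Int) (st : List String × Int × Int) (i : Int) :
    List String × Int × Int :=
  let L := st.1
  let y0 := st.2.1 + (PySem.Int.mod i 3 - 1) * height_var
  let y := if y0 < 3 then 3 else y0
  let z := st.2.2 + spacing
  let color := PySem.List.pyGetD
      ["Bright red", "Bright blue", "Bright yellow", "Bright green", "Bright orange"]
      (PySem.Int.mod i 5) ""
  (L ++ [ "-- Platform " ++ PySem.Int.toStr (i + 1),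
          "local platform" ++ PySem.Int.toStr (i + 1) ++ " = Instance.new(\"Part\")",
          "platform" ++ PySem.Int.toStr (i + 1) ++ ".Name = \"Platform" ++ PySem.Int.toStr (i + 1) ++ "\"",
          "platform" ++ PySem.Int.toStr (i + 1) ++ ".Size = Vector3.new(6, 1, 6)",
          "platform" ++ PySem.Int.toStr (i + 1) ++ ".Position = Vector3.new(0, " ++ PySem.Int.toStr y ++ ", " ++ PySem.Int.toStr z ++ ")",
          "platform" ++ PySem.Int.toStr (i + 1) ++ ".BrickColor = BrickColor.new(\"" ++ color ++ "\")",
          "platform" ++ PySem.Int.toStr (i + 1) ++ ".Material = Enum.Material.Neon",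
          "platform" ++ PySem.Int.toStr (i + 1) ++ ".Anchored = true",
          "platform" ++ PySem.Int.toStr (i + 1) ++ ".Parent = obbyModel",
          "table.insert(parts, platform" ++ PySem.Int.toStr (i + 1) ++ ")",
          "" ],
   y, z)

def build_obby (num_platforms : Int) (difficulty : String) : String :=
  let spacing := (PySem.Dict.ofList [("easy", (8:Int)), ("medium", 12), ("hard", 16)]).getD difficulty 10
  let height_var := (PySem.Dict.ofList [("easy", (2:Int)), ("medium", 4), ("hard", 6)]).getD difficulty 3
  let header : List String :=
    [ "local parts = {}", "",
      "local obbyModel = Instance.new(\"Model\")",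
      "obbyModel.Name = \"Obby\"",
      "obbyModel.Parent = workspace", "",
      "-- Start Platform",
      "local startPlatform = Instance.new(\"SpawnLocation\")",
      "startPlatform.Name = \"Start\"",
      "startPlatform.Size = Vector3.new(15, 3, 15)",
      "startPlatform.Position = Vector3.new(0, 1.5, 0)",
      "startPlatform.BrickColor = BrickColor.new(\"Bright green\")",
      "startPlatform.Material = Enum.Material.Grass",
      "startPlatform.Anchored = true",
      "startPlatform.Parent = obbyModel",
      "table.insert(parts, startPlatform)", "" ]
  let st := (PySem.List.pyRange 0 num_platforms 1).foldl (pvStepA spacing height_var) (header, 3, 15)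
  PySem.Str.join "\n"
    (st.1 ++
      [ "-- End Platform (Victory)",
        "local endPlatform = Instance.new(\"Part\")",
        "endPlatform.Name = \"Victory\"",
        "endPlatform.Size = Vector3.new(15, 3, 15)",
        "endPlatform.Position = Vector3.new(0, " ++ PySem.Int.toStr (st.2.1 + 5) ++ ", " ++ PySem.Int.toStr (st.2.2 + spacing) ++ ")",
        "endPlatform.BrickColor = BrickColor.new(\"Gold\")",
        "endPlatform.Material = Enum.Material.Neon",
        "endPlatform.Anchored = true",
        "endPlatform.Parent = obbyModel",
        "table.insert(parts, endPlatform)", "",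
        "game.Selection:Set(parts)" ])

-- ===== PORT B =====
def pvHeaderLines : List String :=
  [ "local parts = {}", "",
    "local obbyModel = Instance.new(\"Model\")",
    "obbyModel.Name = \"Obby\"",
    "obbyModel.Parent = workspace", "",
    "-- Start Platform",
    "local startPlatform = Instance.new(\"SpawnLocation\")",
    "startPlatform.Name = \"Start\"",
    "startPlatform.Size = Vector3.new(15, 3, 15)",
    "startPlatform.Position = Vector3.new(0, 1.5, 0)",
    "startPlatform.BrickColor = BrickColor.new(\"Bright green\")",
    "startPlatform.Material = Enum.Material.Grass",
    "startPlatform.Anchored = true",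
    "startPlatform.Parent = obbyModel",
    "table.insert(parts, startPlatform)", "" ]

def pvColors : List String :=
  ["Bright red", "Bright blue", "Bright yellow", "Bright green", "Bright orange"]

-- render one platform block from index and its closed-form position
def pvPlatformLines (i y z : Int) (color : String) : List String :=
  let n := PySem.Int.toStr (i + 1)
  [ "-- Platform " ++ n,
    "local platform" ++ n ++ " = Instance.new(\"Part\")",
    "platform" ++ n ++ ".Name = \"Platform" ++ n ++ "\"",
    "platform" ++ n ++ ".Size = Vector3.new(6, 1, 6)",
    "platform" ++ n ++ ".Position = Vector3.new(0, " ++ PySem.Int.toStr y ++ ", " ++ PySem.Int.toStr z ++ ")",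
    "platform" ++ n ++ ".BrickColor = BrickColor.new(\"" ++ color ++ "\")",
    "platform" ++ n ++ ".Material = Enum.Material.Neon",
    "platform" ++ n ++ ".Anchored = true",
    "platform" ++ n ++ ".Parent = obbyModel",
    "table.insert(parts, platform" ++ n ++ ")",
    "" ]

def pvFooterLines (end_y end_z : Int) : List String :=
  [ "-- End Platform (Victory)",
    "local endPlatform = Instance.new(\"Part\")",
    "endPlatform.Name = \"Victory\"",
    "endPlatform.Size = Vector3.new(15, 3, 15)",
    "endPlatform.Position = Vector3.new(0, " ++ PySem.Int.toStr end_y ++ ", " ++ PySem.Int.toStr end_z ++ ")",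
    "endPlatform.BrickColor = BrickColor.new(\"Gold\")",
    "endPlatform.Material = Enum.Material.Neon",
    "endPlatform.Anchored = true",
    "endPlatform.Parent = obbyModel",
    "table.insert(parts, endPlatform)", "",
    "game.Selection:Set(parts)" ]

-- closed forms: the clamp pins platform i's height to 3 except on i % 3 == 2
def pvYAt (height_var i : Int) : Int :=
  if PySem.Int.mod i 3 = 2 then 3 + height_var else 3

def pvZAt (spacing i : Int) : Int := 15 + spacing * (i + 1)

def build_obby_alt (num_platforms : Int) (difficulty : String) : String :=
  let spacing := (PySem.Dict.ofList [("easy", (8:Int)), ("medium", 12), ("hard", 16)]).getD difficulty 10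
  let height_var := (PySem.Dict.ofList [("easy", (2:Int)), ("medium", 4), ("hard", 6)]).getD difficulty 3
  let end_y := (if 0 < num_platforms then pvYAt height_var (num_platforms - 1) else 3) + 5
  let end_z := (if 0 < num_platforms then pvZAt spacing (num_platforms - 1) else 15) + spacing
  PySem.Str.join "\n"
    (pvHeaderLines ++
      (PySem.List.pyRange 0 num_platforms 1).flatMap
        (fun i => pvPlatformLines i (pvYAt height_var i) (pvZAt spacing i)
            (PySem.List.pyGetD pvColors (PySem.Int.mod i 5) "")) ++
      pvFooterLines end_y end_z)

-- ===== PRECONDITION & SPEC =====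
def Spec_build_obby (num_platforms : Int) (difficulty : String) (out : String) : Prop := out = build_obby_alt num_platforms difficulty
instance (num_platforms : Int) (difficulty : String) (out : String) : Decidable (Spec_build_obby num_platforms difficulty out) := by unfold Spec_build_obby; infer_instance

-- ===== CLAIM (what is proved, stated in full; the proofs are below) =====
def Claim_equal_build_obby : Prop := ∀ (num_platforms : Int) (difficulty : String), Dom_build_obby num_platforms difficulty → Spec_build_obby num_platforms difficulty (build_obby num_platforms difficulty)

-- ===== LEMMAS AND PROOFS =====

theorem pvHv_nonneg (d : String) :
    0 ≤ (PySem.Dict.ofList [("easy", (2:Int)), ("medium", 4), ("hard", 6)]).getD d 3 := by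
  simp only [PySem.Dict.getD, PySem.Dict.get?, PySem.Dict.ofList, PySem.Dict.update,
    PySem.Dict.empty, PySem.Dict.insert, PySem.Dict.contains]
  cases h : List.find? (fun p => p.1 == d) [("easy", (2:Int)), ("medium", 4), ("hard", 6)] with
  | none => simp [h]
  | some p =>
      have hm := List.mem_of_find?_eq_some h
      simp [h]
      fin_cases hm <;> norm_num

-- one clamp step lands on the closed form (for a non-negative height_var)
theorem pvY_step (hv : Int) (hhv : 0 ≤ hv) (k : Nat) :
    (if (if 0 < (k:Int) then pvYAt hv ((k:Int) - 1) else 3) +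
         (PySem.Int.mod (k:Int) 3 - 1) * hv < 3 then 3
     else (if 0 < (k:Int) then pvYAt hv ((k:Int) - 1) else 3) +
         (PySem.Int.mod (k:Int) 3 - 1) * hv) = pvYAt hv (k:Int) := by
  simp only [pvYAt, PySem.Int.mod_eq_emod_of_pos (by norm_num : (0:Int) < 3)]
  rcases Nat.eq_zero_or_pos k with hk | hk
  · subst hk; norm_num; omega
  · have hk' : 0 < (k:Int) := by exact_mod_cast hk
    have hm : (k:Int) % 3 = 0 ∨ (k:Int) % 3 = 1 ∨ (k:Int) % 3 = 2 := by omega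
    rcases hm with hm | hm | hm
    · have hm' : ((k:Int) - 1) % 3 = 2 := by omega
      rw [hm]
      simp [hm']
      omega
    · have hm' : ((k:Int) - 1) % 3 = 0 := by omega
      rw [hm]
      simp [hm']
    · have hm' : ((k:Int) - 1) % 3 = 1 := by omega
      rw [hm]
      simp [hm']
      omega

-- A's loop state after k iterations, in closed form
theorem pvLoopA (sp hv : Int) (hhv : 0 ≤ hv) (L : List String) (k : Nat) :
    (PySem.List.pyRange 0 (k:Int) 1).foldl (pvStepA sp hv) (L, 3, 15) =
      (L ++ (PySem.List.pyRange 0 (k:Int) 1).flatMap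
          (fun i => pvPlatformLines i (pvYAt hv i) (pvZAt sp i)
              (PySem.List.pyGetD pvColors (PySem.Int.mod i 5) "")),
       (if 0 < (k:Int) then pvYAt hv ((k:Int) - 1) else 3),
       15 + sp * k) := by
  induction k with
  | zero => simp [PySem.List.pyRange_one_eq_nil]
  | succ k ih =>
      have hc : ((k + 1 : Nat) : Int) = (k:Int) + 1 := by push_cast; ring
      rw [hc, PySem.List.pyRange_one_succ_right (by positivity), List.foldl_append,
        List.flatMap_append, ih]
      have hy := pvY_step hv hhv k
      have hz : 15 + sp * (k:Int) + sp = 15 + sp * ((k:Int) + 1) := by ring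
      have h0 : (0:Int) < (k:Int) + 1 := by positivity
      simp only [List.foldl_cons, List.foldl_nil, List.flatMap_cons, List.flatMap_nil,
        List.append_nil, pvStepA, pvPlatformLines, pvZAt]
      rw [hy, hz]
      simp only [Prod.mk.injEq]
      refine ⟨by simp [pvColors, List.append_assoc], ?_⟩
      simp [h0]

theorem build_obby_eq (num_platforms : Int) (difficulty : String) :
    build_obby num_platforms difficulty = build_obby_alt num_platforms difficulty := by
  by_cases hn : num_platforms ≤ 0
  · simp [build_obby, build_obby_alt, PySem.List.pyRange_one_eq_nil hn,
      not_lt.mpr hn, pvHeaderLines, pvFooterLines]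
  · have hk : num_platforms = ((num_platforms.toNat : Nat) : Int) := by omega
    simp only [build_obby, build_obby_alt]
    rw [hk, pvLoopA _ _ (pvHv_nonneg difficulty)]
    have h0 : (0:Int) < ((num_platforms.toNat : Nat) : Int) := by omega
    rw [if_pos h0]
    have hz : 15 + ((PySem.Dict.ofList [("easy", (8:Int)), ("medium", 12), ("hard", 16)]).getD difficulty 10) * ((num_platforms.toNat : Nat) : Int) + ((PySem.Dict.ofList [("easy", (8:Int)), ("medium", 12), ("hard", 16)]).getD difficulty 10) = pvZAt ((PySem.Dict.ofList [("easy", (8:Int)), ("medium", 12), ("hard", 16)]).getD difficulty 10) (((num_platforms.toNat : Nat) : Int) - 1) + ((PySem.Dict.ofList [("easy", (8:Int)), ("medium", 12), ("hard", 16)]).getD difficulty 10) := by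
      simp only [pvZAt]; ring
    rw [hz]
    have h0' : 0 < num_platforms := by omega
    simp [h0', pvHeaderLines, pvFooterLines]

-- ===== VERDICT (by name: the statement is the Claim_ definition above) =====
theorem build_obby_spec : Claim_equal_build_obby := by
  intro n d _
  exact build_obby_eq n d
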